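-- pv_equiv track=rewrite | github.com/Melodiz/CodeRun | ML/Medium/553_points-in-cube/bruteforce.py | checkIfPointFarEnoughFromVertices
-- ===== SOURCE A (Python) =====
-- def euclidean_distance_squared(point1, point2):
--     return (point1[0] - point2[0]) ** 2 + (point1[1] - point2[1]) ** 2 + (point1[2] - point2[2]) ** 2
--
-- def checkIfPointFarEnoughFromVertices(point, treshold_square):
--     vertices = [
--         (0, 0, 0), (1, 0, 0), (0, 1, 0), (0, 0, 1),
--         (1, 1, 0), (1, 0, 1), (0, 1, 1), (1, 1, 1)
--     ]
--     for vertex in vertices: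
--         if euclidean_distance_squared(point, vertex) <= treshold_square:
--             return False
--     return True
-- ===== SOURCE B (Python) =====
-- def checkIfPointFarEnoughFromVertices(point, treshold_square):
--     # closest cube vertex is chosen per axis: each coordinate independently
--     # snaps to 0 or 1, so the minimum distance-squared is a per-axis sum
--     m = (min(point[0] ** 2, (point[0] - 1) ** 2)
--          + min(point[1] ** 2, (point[1] - 1) ** 2)
--          + min(point[2] ** 2, (point[2] - 1) ** 2))
--     return m > treshold_square
-- ===== Notes on version B (the rewrite author's own statement) =====
-- stated objective: simpler
-- what changed: Replaced the loop over the 8 explicit cube vertices with a closed-form per-axis expression: the nearest vertex coordinate is chosen independently per axis, so B sums min(p[i]^2,(p[i]-1)^2) over the three axes and compares once with the threshold.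
import Mathlib
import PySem

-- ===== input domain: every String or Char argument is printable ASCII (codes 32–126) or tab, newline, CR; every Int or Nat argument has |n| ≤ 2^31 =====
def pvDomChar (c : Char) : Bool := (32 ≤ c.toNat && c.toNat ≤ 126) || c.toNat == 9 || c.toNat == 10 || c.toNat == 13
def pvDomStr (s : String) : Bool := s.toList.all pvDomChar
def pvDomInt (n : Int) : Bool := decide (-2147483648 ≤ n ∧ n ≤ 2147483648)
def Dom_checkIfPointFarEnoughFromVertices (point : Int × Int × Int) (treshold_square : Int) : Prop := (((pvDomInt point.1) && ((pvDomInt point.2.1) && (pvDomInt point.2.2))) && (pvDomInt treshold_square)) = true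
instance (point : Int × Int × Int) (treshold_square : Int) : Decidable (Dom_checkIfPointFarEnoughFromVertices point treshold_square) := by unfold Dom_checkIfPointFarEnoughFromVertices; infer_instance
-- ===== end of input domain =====

-- ===== PORT A =====
def euclidean_distance_squared (point1 point2 : Int × Int × Int) : Int :=
  (point1.1 - point2.1) ^ 2 + (point1.2.1 - point2.2.1) ^ 2 + (point1.2.2 - point2.2.2) ^ 2

-- the 'for vertex in vertices: if … return False' loop, as structural recursion
def checkVerticesLoop (point : Int × Int × Int) (treshold_square : Int) : List (Int × Int × Int) → Bool
  | [] => true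
  | v :: rest =>
    if euclidean_distance_squared point v ≤ treshold_square then false
    else checkVerticesLoop point treshold_square rest

def checkIfPointFarEnoughFromVertices (point : Int × Int × Int) (treshold_square : Int) : Bool :=
  checkVerticesLoop point treshold_square
    [(0, 0, 0), (1, 0, 0), (0, 1, 0), (0, 0, 1),
     (1, 1, 0), (1, 0, 1), (0, 1, 1), (1, 1, 1)]

-- ===== PORT B =====
-- B: per-axis closed form, no loop over vertices
def checkIfPointFarEnoughFromVertices_alt (point : Int × Int × Int) (treshold_square : Int) : Bool :=
  let m := min (point.1 ^ 2) ((point.1 - 1) ^ 2)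
         + min (point.2.1 ^ 2) ((point.2.1 - 1) ^ 2)
         + min (point.2.2 ^ 2) ((point.2.2 - 1) ^ 2)
  decide (m > treshold_square)

-- ===== PRECONDITION & SPEC =====
def Spec_checkIfPointFarEnoughFromVertices (point : Int × Int × Int) (treshold_square : Int) (out : Bool) : Prop := out = checkIfPointFarEnoughFromVertices_alt point treshold_square
instance (point : Int × Int × Int) (treshold_square : Int) (out : Bool) : Decidable (Spec_checkIfPointFarEnoughFromVertices point treshold_square out) := by unfold Spec_checkIfPointFarEnoughFromVertices; infer_instance

-- ===== CLAIM (what is proved, stated in full; the proofs are below) =====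
def Claim_equal_checkIfPointFarEnoughFromVertices : Prop := ∀ (point : Int × Int × Int) (treshold_square : Int), Dom_checkIfPointFarEnoughFromVertices point treshold_square → Spec_checkIfPointFarEnoughFromVertices point treshold_square (checkIfPointFarEnoughFromVertices point treshold_square)

-- ===== LEMMAS AND PROOFS =====

-- ===== VERDICT (by name: the statement is the Claim_ definition above) =====
theorem checkIfPointFarEnoughFromVertices_spec : Claim_equal_checkIfPointFarEnoughFromVertices := by
  intro ⟨x, y, z⟩ t _
  show checkVerticesLoop _ _ _ = _
  simp only [checkVerticesLoop, euclidean_distance_squared,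
    checkIfPointFarEnoughFromVertices_alt]
  simp only [Int.sub_zero]
  generalize hx0 : x ^ 2 = a0
  generalize hx1 : (x - 1) ^ 2 = a1
  generalize hy0 : y ^ 2 = b0
  generalize hy1 : (y - 1) ^ 2 = b1
  generalize hz0 : z ^ 2 = c0
  generalize hz1 : (z - 1) ^ 2 = c1
  split_ifs <;> simp <;> omega
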